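-- pv_equiv track=rewrite | github.com/ilukgolf/STD-CS350-Data_Structures-Lab1_RecursiveSearchInCharacterArray | Code without comments.py | collect_lowercase_recursive
-- ===== SOURCE A (Python) =====
-- def collect_lowercase_recursive(data, row=0, col=0, collected=None):
--     if collected is None:
--         collected = []
--     if row >= len(data):
--         return collected
--     if col >= len(data[row]):
--         return collect_lowercase_recursive(data, row + 1, 0, collected)
--     if data[row][col].islower():
--         collected.append(data[row][col])
--     return collect_lowercase_recursive(data, row, col + 1, collected)
-- ===== SOURCE B (Python) =====
-- def collect_lowercase_recursive(data, row=0, col=0, collected=None):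
--     if collected is None:
--         collected = []
--     r, c = row, col
--     while r < len(data):
--         rdata = data[r]
--         while c < len(rdata):
--             if rdata[c].islower():
--                 collected.append(rdata[c])
--             c += 1
--         c = 0
--         r += 1
--     return collected
-- ===== Notes on version B (the rewrite author's own statement) =====
-- stated objective: idiomatic
-- what changed: Replaces the per-cell recursion by two nested while loops over local row/col cursors (col offset consumed on the first row, then reset to 0), still mutating and returning the caller-supplied collected list; Pre_ excludes only inputs on which A raises IndexError (a start row below -len(data), or a start col below -len(data[row])).
import Mathlib
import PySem

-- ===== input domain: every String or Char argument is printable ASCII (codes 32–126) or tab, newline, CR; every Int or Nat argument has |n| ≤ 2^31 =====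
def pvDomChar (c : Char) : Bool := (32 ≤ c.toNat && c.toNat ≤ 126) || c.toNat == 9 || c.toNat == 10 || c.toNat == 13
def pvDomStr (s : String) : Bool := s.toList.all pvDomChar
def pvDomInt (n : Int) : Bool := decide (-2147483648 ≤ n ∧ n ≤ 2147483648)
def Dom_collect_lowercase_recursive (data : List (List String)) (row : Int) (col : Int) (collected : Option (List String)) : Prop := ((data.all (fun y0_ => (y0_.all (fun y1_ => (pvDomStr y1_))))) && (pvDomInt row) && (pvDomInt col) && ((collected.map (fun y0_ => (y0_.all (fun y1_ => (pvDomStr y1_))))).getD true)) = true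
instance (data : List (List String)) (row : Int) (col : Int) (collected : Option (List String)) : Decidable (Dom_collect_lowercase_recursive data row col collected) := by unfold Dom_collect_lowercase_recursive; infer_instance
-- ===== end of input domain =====

-- B replaces A's per-cell recursion by two nested while loops over local row/col cursors
-- (iterative decomposition, same O(cells) work); the RETURN value is proved equal — both
-- Pythons also mutate a caller-supplied `collected` list in the same way (append in order).

-- Python str.islower() : at least one cased character and no uppercase one; exact on the
-- ASCII domain (Dom_), where the cased characters are exactly 'a'-'z' and 'A'-'Z'.
def pvIslower (s : String) : Bool :=
  (s.toList.any fun c => 'a' ≤ c && c ≤ 'z') && (s.toList.all fun c => !('A' ≤ c && c ≤ 'Z'))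

-- ===== PORT A =====
-- literal port of A's recursion; the `none` branches are Python's IndexError (outside Pre_)
def pvLoopA (data : List (List String)) (row : Int) (col : Int) (collected : List String) : List String :=
  if (data.length : Int) ≤ row then collected
  else
    match h : PySem.List.pyGet? data row with
    | none => collected        -- len(data[row]) raises IndexError
    | some rdata =>
      if (rdata.length : Int) ≤ col then pvLoopA data (row + 1) 0 collected
      else
        match PySem.List.pyGet? rdata col with
        | none => collected    -- data[row][col] raises IndexError
        | some ch =>
          pvLoopA data row (col + 1) (if pvIslower ch then collected ++ [ch] else collected)
termination_by (((data.length : Int) - row).toNat, (((PySem.List.pyGet? data row).getD []).length - col).toNat)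
decreasing_by
  · apply Prod.Lex.left; omega
  · apply Prod.Lex.right; simp only [h, Option.getD_some]; omega

def collect_lowercase_recursive (data : List (List String)) (row : Int) (col : Int) (collected : Option (List String)) : List String :=
  pvLoopA data row col (collected.getD [])

-- ===== PORT B =====
-- inner while loop: `while c < len(rdata): if rdata[c].islower(): append; c += 1`
def pvInnerB (rdata : List String) (c : Int) (acc : List String) : List String :=
  if c < (rdata.length : Int) then
    match PySem.List.pyGet? rdata c with
    | none => acc              -- rdata[c] raises IndexError (outside Pre_)
    | some ch => pvInnerB rdata (c + 1) (if pvIslower ch then acc ++ [ch] else acc)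
  else acc
termination_by ((rdata.length : Int) - c).toNat
decreasing_by omega

-- outer while loop: `while r < len(data): rdata = data[r]; <inner loop>; c = 0; r += 1`
def pvOuterB (data : List (List String)) (r : Int) (c : Int) (acc : List String) : List String :=
  if r < (data.length : Int) then
    match PySem.List.pyGet? data r with
    | none => acc              -- data[r] raises IndexError (outside Pre_)
    | some rdata => pvOuterB data (r + 1) 0 (pvInnerB rdata c acc)
  else acc
termination_by ((data.length : Int) - r).toNat
decreasing_by omega

def collect_lowercase_recursive_alt (data : List (List String)) (row : Int) (col : Int) (collected : Option (List String)) : List String :=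
  pvOuterB data row col (collected.getD [])

-- ===== PRECONDITION & SPEC =====
-- Pre_ excludes exactly the inputs on which A raises IndexError: a start row below
-- -len(data), or (with a valid start row) a start col below -len(data[row]).
def Pre_collect_lowercase_recursive (data : List (List String)) (row : Int) (col : Int) (collected : Option (List String)) : Prop :=
  (data.length : Int) ≤ row ∨
    (-(data.length : Int) ≤ row ∧
     -((((PySem.List.pyGet? data row).getD []).length : Int)) ≤ col)

instance (data : List (List String)) (row : Int) (col : Int) (collected : Option (List String)) : Decidable (Pre_collect_lowercase_recursive data row col collected) := by unfold Pre_collect_lowercase_recursive; infer_instance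

def pvWitness_collect_lowercase_recursive : List (List String) × Int × Int × Option (List String) :=
  ([["a", "B"], ["cd", "7"]], 0, 0, none)

def Spec_collect_lowercase_recursive (data : List (List String)) (row : Int) (col : Int) (collected : Option (List String)) (out : List String) : Prop := out = collect_lowercase_recursive_alt data row col collected
instance (data : List (List String)) (row : Int) (col : Int) (collected : Option (List String)) (out : List String) : Decidable (Spec_collect_lowercase_recursive data row col collected out) := by unfold Spec_collect_lowercase_recursive; infer_instance

-- ===== CLAIM (what is proved, stated in full; the proofs are below) =====
def Claim_equal_collect_lowercase_recursive : Prop := ∀ (data : List (List String)) (row : Int) (col : Int) (collected : Option (List String)), Dom_collect_lowercase_recursive data row col collected → Pre_collect_lowercase_recursive data row col collected → Spec_collect_lowercase_recursive data row col collected (collect_lowercase_recursive data row col collected)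

-- ===== LEMMAS AND PROOFS =====

-- a valid index yields a value
lemma pvGet_some {α : Type} (xs : List α) (i : Int)
    (h1 : -(xs.length : Int) ≤ i) (h2 : i < (xs.length : Int)) :
    ∃ a, PySem.List.pyGet? xs i = some a := by
  cases hg : PySem.List.pyGet? xs i with
  | none =>
    rw [PySem.List.pyGet?_eq_none_iff] at hg
    exact absurd (by unfold PySem.Raise.InRange; omega) hg
  | some a => exact ⟨a, rfl⟩

-- A's scan of one row from cell `col` equals B's inner loop followed by A's move to the next row
lemma pvLoopA_row (data : List (List String)) (row : Int) (rdata : List String)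
    (hrow : row < (data.length : Int)) (hget : PySem.List.pyGet? data row = some rdata) :
    ∀ (m : Nat) (col : Int) (acc : List String),
      (((rdata.length : Int) - col).toNat = m) → -(rdata.length : Int) ≤ col →
      pvLoopA data row col acc = pvLoopA data (row + 1) 0 (pvInnerB rdata col acc) := by
  intro m
  induction m with
  | zero =>
    intro col acc hm hc
    have hcol : (rdata.length : Int) ≤ col := by omega
    rw [pvLoopA, if_neg (by omega : ¬ (data.length : Int) ≤ row)]
    rw [pvInnerB, if_neg (by omega : ¬ col < (rdata.length : Int))]
    split
    · next heq => rw [hget] at heq; cases heq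
    · next r heq =>
      rw [hget] at heq; cases heq
      rw [if_pos hcol]
  | succ m ih =>
    intro col acc hm hc
    have hcol : col < (rdata.length : Int) := by omega
    obtain ⟨ch, hch⟩ := pvGet_some rdata col hc hcol
    rw [pvLoopA, if_neg (by omega : ¬ (data.length : Int) ≤ row)]
    rw [pvInnerB, if_pos hcol, hch]
    split
    · next heq => rw [hget] at heq; cases heq
    · next r heq =>
      rw [hget] at heq; cases heq
      rw [if_neg (by omega : ¬ (rdata.length : Int) ≤ col), hch]
      exact ih (col + 1) _ (by omega) (by omega)

-- A's scan from row `row` equals B's outer loop, given a valid (or past-the-end) start cell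
lemma pvLoopA_eq_outer (data : List (List String)) :
    ∀ (n : Nat) (row col : Int) (acc : List String),
      (((data.length : Int) - row).toNat = n) → -(data.length : Int) ≤ row →
      -((((PySem.List.pyGet? data row).getD []).length : Int)) ≤ col →
      pvLoopA data row col acc = pvOuterB data row col acc := by
  intro n
  induction n with
  | zero =>
    intro row col acc hn hr _hc
    have hrow : (data.length : Int) ≤ row := by omega
    rw [pvLoopA, if_pos hrow, pvOuterB, if_neg (by omega : ¬ row < (data.length : Int))]
  | succ n ih =>
    intro row col acc hn hr hc
    have hrow : row < (data.length : Int) := by omega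
    obtain ⟨rdata, hget⟩ := pvGet_some data row hr hrow
    rw [hget] at hc
    rw [pvLoopA_row data row rdata hrow hget (((rdata.length : Int) - col).toNat) col acc rfl
        (by simpa using hc)]
    rw [pvOuterB, if_pos hrow, hget]
    exact ih (row + 1) 0 _ (by omega) (by omega) (by simp)

-- ===== VERDICT (by name: the statement is the Claim_ definition above) =====
theorem collect_lowercase_recursive_spec : Claim_equal_collect_lowercase_recursive := by
  intro data row col collected _hdom hpre
  unfold Spec_collect_lowercase_recursive collect_lowercase_recursive collect_lowercase_recursive_alt
  rcases hpre with h | ⟨h1, h2⟩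
  · rw [pvLoopA, if_pos h, pvOuterB, if_neg (by omega : ¬ row < (data.length : Int))]
  · exact pvLoopA_eq_outer data _ row col _ rfl h1 h2
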